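-- pv_equiv track=rewrite | github.com/sueszli/vector-database-benchmark | dataset/python-mutated/spark_dataset.py | _parse_glob_pattern
-- ===== SOURCE A (Python) =====
-- def _parse_glob_pattern(pattern: str) -> str:
--     if False:
--         i = 10
--         return i + 15
--     special = ('*', '?', '[')
--     clean = []
--     for part in pattern.split('/'):
--         if any((char in part for char in special)):
--             break
--         clean.append(part)
--     return '/'.join(clean)
-- ===== SOURCE B (Python) =====
-- def _parse_glob_pattern(pattern: str) -> str:
--     # Single left-to-right character scan: remember the prefix ending at the
--     # last '/' seen; on the first glob metacharacter return that prefix.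
--     keep = ''
--     seen = []
--     for ch in pattern:
--         if ch in '*?[':
--             return keep
--         if ch == '/':
--             keep = ''.join(seen)
--         seen.append(ch)
--     return pattern
-- ===== Notes on version B (the rewrite author's own statement) =====
-- stated objective: alternative
-- what changed: Replaces split-on-separator / part-loop / join with a single left-to-right character scan that tracks the prefix ending at the last path separator and returns it at the first glob metacharacter.
import Mathlib
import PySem

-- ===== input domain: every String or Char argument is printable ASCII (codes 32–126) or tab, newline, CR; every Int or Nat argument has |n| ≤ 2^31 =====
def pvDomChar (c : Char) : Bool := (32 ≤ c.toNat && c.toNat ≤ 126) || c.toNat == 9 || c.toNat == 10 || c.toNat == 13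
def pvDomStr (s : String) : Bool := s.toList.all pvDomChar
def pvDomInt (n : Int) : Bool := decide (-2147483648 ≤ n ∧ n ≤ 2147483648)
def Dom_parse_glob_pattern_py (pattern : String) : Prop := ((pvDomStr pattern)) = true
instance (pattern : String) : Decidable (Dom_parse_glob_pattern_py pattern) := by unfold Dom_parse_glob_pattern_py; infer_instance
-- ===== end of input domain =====

-- B replaces A's split-on-separator / part-loop / join with a single character scan tracking
-- the prefix ending at the last path separator; objective: alternative decomposition.

-- ===== PORT A =====
-- `any(char in part for char in special)`: each `char` is a single character, so Python's
-- substring test `char in part` is exactly list membership — ported as `ch ∈ p` (exact here).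
def pvBad (p : List Char) : Bool := ['*', '?', '['].any (fun ch => decide (ch ∈ p))

-- the `for part in …: if …: break; clean.append(part)` loop, state = `clean`
def pvALoop : List (List Char) → List (List Char) → List (List Char)
  | [], clean => clean
  | p :: rest, clean => if pvBad p then clean else pvALoop rest (clean ++ [p])

def parse_glob_pattern_py (pattern : String) : String :=
  String.ofList (PySem.Chars.join ['/'] (pvALoop (PySem.Chars.splitOn pattern.toList ['/']) []))

-- ===== PORT B =====
-- `ch in '*?['` tests membership of one character — ported as the three-way comparison (exact).
def pvMeta (c : Char) : Bool := c == '*' || c == '?' || c == '['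

-- Source B's scan; state = (seen, keep); `some r` = the early `return keep`, `none` = loop fell through
def pvBLoop : List Char → List Char → List Char → Option (List Char)
  | [], _, _ => none
  | c :: t, seen, keep =>
    if pvMeta c then some keep
    else pvBLoop t (seen ++ [c]) (if c == '/' then seen else keep)

def parse_glob_pattern_py_alt (pattern : String) : String :=
  match pvBLoop pattern.toList [] [] with
  | some r => String.ofList r
  | none => pattern

-- ===== PRECONDITION & SPEC =====
def Spec_parse_glob_pattern_py (pattern : String) (out : String) : Prop := out = parse_glob_pattern_py_alt pattern
instance (pattern : String) (out : String) : Decidable (Spec_parse_glob_pattern_py pattern out) := by unfold Spec_parse_glob_pattern_py; infer_instance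

-- ===== CLAIM (what is proved, stated in full; the proofs are below) =====
def Claim_equal_parse_glob_pattern_py : Prop := ∀ (pattern : String), Dom_parse_glob_pattern_py pattern → Spec_parse_glob_pattern_py pattern (parse_glob_pattern_py pattern)

-- ===== LEMMAS AND PROOFS =====

-- PySem.Chars.splitOn with a single-character separator is Mathlib's List.splitOn
lemma pv_go_eq (fuel : Nat) : ∀ (l cur : List Char) (acc : List (List Char)) (_ : l.length ≤ fuel),
    PySem.Chars.splitOn.go ['/'] fuel l cur acc
      = acc.reverse ++ List.modifyHead (cur.reverse ++ ·) (l.splitOn '/') := by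
  induction fuel with
  | zero =>
    intro l cur acc h
    have : l = [] := List.eq_nil_of_length_eq_zero (Nat.le_zero.mp h)
    subst this
    rw [PySem.Chars.splitOn.go.eq_def]
    simp [List.splitOn]
  | succ n ih =>
    intro l cur acc h
    cases l with
    | nil =>
      rw [PySem.Chars.splitOn.go.eq_def]
      simp [List.splitOn]
    | cons c rest =>
      rw [PySem.Chars.splitOn.go.eq_def]
      by_cases hc : c = '/'
      · subst hc
        have hpre : List.isPrefixOf ['/'] ('/' :: rest) = true := by simp [List.isPrefixOf]
        simp only [hpre, if_pos]
        have hd : List.drop (['/'] : List Char).length ('/' :: rest) = rest := by simp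
        rw [hd, ih rest [] _ (by simpa using h)]
        have hsp2 : ('/' :: rest).splitOn '/' = [] :: rest.splitOn '/' := by
          simp [List.splitOn, List.splitOnP_cons]
        rw [hsp2]
        cases hsp : rest.splitOn '/' with
        | nil => exact absurd hsp (List.splitOnP_ne_nil _ _)
        | cons a b => simp
      · have hpre : List.isPrefixOf ['/'] (c :: rest) = false := by
          simp [List.isPrefixOf]
          intro hh; exact absurd hh.symm hc
        simp only [hpre, Bool.false_eq_true, if_false]
        rw [ih rest (c :: cur) acc (by simpa using h)]
        have hsp2 : (c :: rest).splitOn '/' = List.modifyHead (c :: ·) (rest.splitOn '/') := by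
          simp [List.splitOn, List.splitOnP_cons, hc]
        rw [hsp2]
        cases hsp : rest.splitOn '/' with
        | nil => exact absurd hsp (List.splitOnP_ne_nil _ _)
        | cons a b => simp

lemma pv_chars_splitOn_eq (cs : List Char) :
    PySem.Chars.splitOn cs ['/'] = cs.splitOn '/' := by
  rw [PySem.Chars.splitOn, pv_go_eq (cs.length + 1) cs [] [] (by omega)]
  cases hsp : cs.splitOn '/' with
  | nil => exact absurd hsp (List.splitOnP_ne_nil _ _)
  | cons a b => simp

lemma pvBad_nil : pvBad [] = false := by decide

lemma pvBad_cons (c : Char) (t : List Char) : pvBad (c :: t) = (pvMeta c || pvBad t) := by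
  rw [Bool.eq_iff_iff]
  simp [pvBad, pvMeta, List.mem_cons]
  aesop

-- A's loop is takeWhile over the good parts
lemma pvALoop_eq (l : List (List Char)) : ∀ acc,
    pvALoop l acc = acc ++ l.takeWhile (fun p => !pvBad p) := by
  induction l with
  | nil => intro acc; simp [pvALoop]
  | cons p rest ih =>
    intro acc
    by_cases hb : pvBad p
    · simp [pvALoop, hb, List.takeWhile_cons]
    · simp only [pvALoop, hb, if_false, Bool.false_eq_true, ih, List.takeWhile_cons,
        eq_self_iff_true]
      simp [hb]

-- the parts A keeps
def pvKT (cs : List Char) : List (List Char) := (cs.splitOn '/').takeWhile (fun p => !pvBad p)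

lemma pv_splitOn_slash (t : List Char) : ('/' :: t).splitOn '/' = [] :: t.splitOn '/' := by
  simp [List.splitOn, List.splitOnP_cons]

lemma pv_splitOn_other {c : Char} (t : List Char) (hc : c ≠ '/') :
    (c :: t).splitOn '/' = List.modifyHead (c :: ·) (t.splitOn '/') := by
  simp [List.splitOn, List.splitOnP_cons, hc]

-- a metacharacter anywhere in cs ⟺ a metacharacter in some part
lemma pv_badSplit (cs : List Char) : pvBad cs = (cs.splitOn '/').any pvBad := by
  induction cs with
  | nil => simp [List.splitOn, pvBad_nil]
  | cons c t ih =>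
    by_cases hc : c = '/'
    · subst hc
      rw [pv_splitOn_slash, pvBad_cons, ih]
      simp [pvMeta, pvBad_nil]
    · rw [pv_splitOn_other t hc, pvBad_cons]
      cases hsp : t.splitOn '/' with
      | nil => exact absurd hsp (List.splitOnP_ne_nil _ _)
      | cons h tl =>
        rw [hsp] at ih
        simp only [List.modifyHead, List.any_cons, pvBad_cons] at *
        rw [ih]
        cases pvMeta c <;> cases pvBad h <;> simp

lemma pvKT_slash (t : List Char) : pvKT ('/' :: t) = [] :: pvKT t := by
  simp [pvKT, pv_splitOn_slash, List.takeWhile_cons, pvBad_nil]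

lemma pvKT_meta {c : Char} (t : List Char) (hm : pvMeta c = true) : pvKT (c :: t) = [] := by
  have hc : c ≠ '/' := by
    intro h; subst h; simp [pvMeta] at hm
  rw [pvKT, pv_splitOn_other t hc]
  cases hsp : t.splitOn '/' with
  | nil => exact absurd hsp (List.splitOnP_ne_nil _ _)
  | cons h tl => simp [List.takeWhile_cons, pvBad_cons, hm]

lemma pvKT_other {c : Char} (t : List Char) (hc : c ≠ '/') (hm : pvMeta c = false) :
    pvKT (c :: t) = List.modifyHead (c :: ·) (pvKT t) := by
  rw [pvKT, pvKT, pv_splitOn_other t hc]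
  cases hsp : t.splitOn '/' with
  | nil => exact absurd hsp (List.splitOnP_ne_nil _ _)
  | cons h tl =>
    by_cases hb : pvBad h
    · simp [List.takeWhile_cons, pvBad_cons, hm, hb]
    · simp [List.takeWhile_cons, pvBad_cons, hm, hb]

lemma pv_join_nil_cons (l : List (List Char)) :
    PySem.Chars.join ['/'] ([] :: l)
      = if l = [] then [] else '/' :: PySem.Chars.join ['/'] l := by
  cases l with
  | nil => simp [PySem.Chars.join_singleton]
  | cons x zs => rw [PySem.Chars.join_cons_cons]; simp

lemma pv_join_modifyHead (c : Char) (l : List (List Char)) (hl : l ≠ []) :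
    PySem.Chars.join ['/'] (List.modifyHead (c :: ·) l) = c :: PySem.Chars.join ['/'] l := by
  cases l with
  | nil => exact absurd rfl hl
  | cons x zs =>
    cases zs with
    | nil => simp [List.modifyHead, PySem.Chars.join_singleton]
    | cons y ws =>
      simp only [List.modifyHead, PySem.Chars.join_cons_cons]
      simp

-- the heart: B's scan computes "keep if no good part, else seen ++ join of the good parts"
lemma pvBLoop_eq (cs : List Char) : ∀ (seen keep : List Char),
    pvBLoop cs seen keep =
      if pvBad cs then
        some (if pvKT cs = [] then keep else seen ++ PySem.Chars.join ['/'] (pvKT cs))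
      else none := by
  induction cs with
  | nil => intro seen keep; simp [pvBLoop, pvBad_nil]
  | cons c t ih =>
    intro seen keep
    by_cases hm : pvMeta c
    · simp [pvBLoop, hm, pvBad_cons, pvKT_meta t hm]
    · by_cases hc : c = '/'
      · subst hc
        rw [show pvBLoop ('/' :: t) seen keep = pvBLoop t (seen ++ ['/']) seen by
              simp [pvBLoop, hm]]
        rw [ih, pvBad_cons, pvKT_slash, pv_join_nil_cons]
        simp only [hm, Bool.false_or]
        by_cases hb : pvBad t
        · simp only [hb, if_true, List.cons_ne_self, reduceIte]
          by_cases hk : pvKT t = []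
          · simp [hk]
          · simp [hk, List.append_assoc]
        · simp [hb]
      · rw [show pvBLoop (c :: t) seen keep = pvBLoop t (seen ++ [c]) keep by
              simp [pvBLoop, hm, hc]]
        rw [ih, pvBad_cons, pvKT_other t hc (by simpa using hm)]
        simp only [hm, Bool.false_or]
        by_cases hb : pvBad t
        · simp only [hb, if_true]
          by_cases hk : pvKT t = []
          · simp [hk]
          · have hk' : List.modifyHead (c :: ·) (pvKT t) ≠ [] := by
              cases h : pvKT t with
              | nil => exact absurd h hk
              | cons a b => simp [h, List.modifyHead]
            simp only [hk, hk', if_false, if_neg hk, if_neg hk']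
            rw [pv_join_modifyHead c (pvKT t) hk]
            simp [List.append_assoc]
        · simp [hb]

-- ===== VERDICT (by name: the statement is the Claim_ definition above) =====
theorem parse_glob_pattern_py_spec : Claim_equal_parse_glob_pattern_py := by
  intro pattern _dom
  unfold Spec_parse_glob_pattern_py parse_glob_pattern_py parse_glob_pattern_py_alt
  rw [pv_chars_splitOn_eq, pvALoop_eq, pvBLoop_eq]
  by_cases hb : pvBad pattern.toList
  · simp only [hb, if_true, List.nil_append]
    have hA : List.takeWhile (fun p => !pvBad p) (List.splitOn '/' pattern.toList)
        = pvKT pattern.toList := rfl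
    rw [hA]
    by_cases hk : pvKT pattern.toList = []
    · simp [hk, PySem.Chars.join_nil]
    · simp [hk]
  · simp only [hb, if_false, Bool.false_eq_true]
    have hfalse : pvBad pattern.toList = false := by simpa using hb
    have hall : ∀ p ∈ pattern.toList.splitOn '/', (!pvBad p) = true := by
      have h2 := pv_badSplit pattern.toList
      rw [hfalse] at h2
      intro p hp
      simpa using List.any_eq_false.mp h2.symm p hp
    rw [List.takeWhile_eq_self_iff.mpr hall]
    simp only [List.nil_append]
    have hj : PySem.Chars.join ['/'] (pattern.toList.splitOn '/') = pattern.toList := by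
      rw [PySem.Chars.join]
      exact List.intercalate_splitOn pattern.toList '/'
    rw [hj, String.ofList_toList]
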